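-- pv_equiv track=rewrite | github.com/maslov-k/hse_algorithms | 6_a_phones.py | clear_phone_number
-- ===== SOURCE A (Python) =====
-- def clear_phone_number(phone_number):
--     clean_number = 0
--
--     base = 1
--
--     for i in range(len(phone_number) - 1, -1, -1):
--         c = phone_number[i]
--
--         if c.isdigit():
--             if base == 10000000000:
--                 clean_number += base * 7
--             else:
--                 clean_number += base * int(c)
--             base *= 10
--
--     if base == 10000000:
--         clean_number += 7495 * base
--
--     return clean_number
-- ===== SOURCE B (Python) =====
-- def clear_phone_number(phone_number):
--     digits = [c for c in phone_number if c.isdigit()]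
--     n = len(digits)
--     if n >= 11:
--         digits[n - 11] = '7'
--     value = 0
--     for c in digits:
--         value = value * 10 + int(c)
--     if n == 7:
--         value += 7495 * 10 ** 7
--     return value
-- ===== Notes on version B (the rewrite author's own statement) =====
-- stated objective: simpler
-- what changed: Replaces the reverse index loop with a base-powers accumulator by collecting the digits in one forward pass, overwriting the digit at index n-11 with '7' when n>=11, and folding left with value = value*10 + digit.
import Mathlib
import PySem

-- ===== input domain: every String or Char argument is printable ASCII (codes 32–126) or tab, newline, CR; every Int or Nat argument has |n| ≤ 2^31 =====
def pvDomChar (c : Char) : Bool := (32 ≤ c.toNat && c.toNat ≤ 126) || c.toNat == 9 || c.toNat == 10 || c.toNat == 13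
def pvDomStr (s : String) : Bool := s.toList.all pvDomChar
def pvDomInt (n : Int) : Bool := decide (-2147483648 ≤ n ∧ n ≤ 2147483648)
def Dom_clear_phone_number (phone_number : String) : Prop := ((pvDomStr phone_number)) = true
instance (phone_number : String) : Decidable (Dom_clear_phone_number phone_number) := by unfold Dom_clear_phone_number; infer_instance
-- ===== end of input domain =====

-- B collects the digits in one forward pass, forces index n-11 to '7' when n ≥ 11, and folds
-- left (value*10 + digit), replacing A's reverse traversal with a base-powers accumulator (simpler).


-- int(c) for a single digit character '0'..'9' (the only characters either port applies it to)
def pvDigitVal (c : Char) : Int := (c.toNat : Int) - 48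

-- ===== PORT A =====
-- for i in range(len(s)-1,-1,-1): c = s[i]  — the characters from last to first, i.e. a fold over
-- the reversed character list with the same (clean_number, base) state; c.isdigit() on a printable
-- ASCII character is Char.isDigit (exact on the Dom domain).
def clear_phone_number (phone_number : String) : Int :=
  let r := phone_number.toList.reverse.foldl
    (fun (st : Int × Int) c =>
      if c.isDigit then
        (st.1 + (if st.2 = 10000000000 then st.2 * 7 else st.2 * pvDigitVal c), st.2 * 10)
      else st)
    (0, 1)
  if r.2 = 10000000 then r.1 + 7495 * r.2 else r.1

-- ===== PORT B =====
def clear_phone_number_alt (phone_number : String) : Int :=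
  let digits := phone_number.toList.filter Char.isDigit
  let n := digits.length
  let digits := if 11 ≤ n then digits.set (n - 11) '7' else digits
  let value := digits.foldl (fun acc c => acc * 10 + pvDigitVal c) 0
  if n = 7 then value + 7495 * 10 ^ 7 else value

-- ===== PRECONDITION & SPEC =====
def Spec_clear_phone_number (phone_number : String) (out : Int) : Prop := out = clear_phone_number_alt phone_number
instance (phone_number : String) (out : Int) : Decidable (Spec_clear_phone_number phone_number out) := by unfold Spec_clear_phone_number; infer_instance

-- ===== CLAIM (what is proved, stated in full; the proofs are below) =====
def Claim_equal_clear_phone_number : Prop := ∀ (phone_number : String), Dom_clear_phone_number phone_number → Spec_clear_phone_number phone_number (clear_phone_number phone_number)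

-- ===== LEMMAS AND PROOFS =====

-- the value A's loop accumulates over the digit list (read right-to-left by the loop)
def pvAV : List Char → Int
  | [] => 0
  | c :: t => pvAV t + (if t.length = 10 then (10:Int) ^ 10 * 7 else (10:Int) ^ t.length * pvDigitVal c)

theorem pv_pow10_inj (n m : ℕ) (h : (10:Int) ^ n = (10:Int) ^ m) : n = m := by
  have : ((10 ^ n : ℕ) : ℤ) = ((10 ^ m : ℕ) : ℤ) := by push_cast; exact_mod_cast h
  exact Nat.pow_right_injective (by norm_num) (Nat.cast_injective this)

theorem pv_foldr_A (ds : List Char) :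
    ds.foldr (fun c (st : Int × Int) =>
        (st.1 + (if st.2 = 10000000000 then st.2 * 7 else st.2 * pvDigitVal c), st.2 * 10)) (0, 1)
      = (pvAV ds, (10:Int) ^ ds.length) := by
  induction ds with
  | nil => simp [pvAV]
  | cons c t ih =>
    simp only [List.foldr_cons, ih, pvAV, List.length_cons, Prod.mk.injEq]
    refine ⟨?_, ?_⟩
    · by_cases h : t.length = 10
      · simp [h]
      · have : ¬ ((10:Int) ^ t.length = 10000000000) := by
          intro hc
          exact h (pv_pow10_inj t.length 10 (by rw [hc]; norm_num))
        simp [h, this]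
    · rw [pow_succ]

def pvV (l : List Char) : Int := l.foldl (fun acc c => acc * 10 + pvDigitVal c) 0

theorem pv_foldl_shift (l : List Char) (a : Int) :
    l.foldl (fun acc c => acc * 10 + pvDigitVal c) a
      = a * (10:Int) ^ l.length + l.foldl (fun acc c => acc * 10 + pvDigitVal c) 0 := by
  induction l generalizing a with
  | nil => simp
  | cons c t ih =>
    simp only [List.foldl_cons]
    rw [ih (a * 10 + pvDigitVal c), ih (0 * 10 + pvDigitVal c)]
    simp only [List.length_cons, pow_succ]
    ring

theorem pvV_cons (c : Char) (t : List Char) :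
    pvV (c :: t) = pvDigitVal c * (10:Int) ^ t.length + pvV t := by
  simp only [pvV, List.foldl_cons]
  rw [pv_foldl_shift t (0 * 10 + pvDigitVal c)]
  ring

theorem pvAV_short (l : List Char) (h : l.length ≤ 10) : pvAV l = pvV l := by
  induction l with
  | nil => simp [pvAV, pvV]
  | cons c t ih =>
    have ht : t.length ≤ 9 := by simpa using Nat.lt_succ_iff.mp (lt_of_lt_of_le (by simp) h)
    rw [pvAV, pvV_cons, ih (le_trans ht (by norm_num)), if_neg (by omega)]
    ring

theorem pvAV_eq (l : List Char) :
    pvAV l = pvV (if 11 ≤ l.length then l.set (l.length - 11) '7' else l) := by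
  induction l with
  | nil => simp [pvAV, pvV]
  | cons c t ih =>
    by_cases h : 11 ≤ (c :: t).length
    · rw [if_pos h]
      by_cases h10 : t.length = 10
      · -- exactly 11 digits: the head is overwritten
        have : (c :: t).length - 11 = 0 := by simp [h10]
        rw [this]
        show pvAV (c :: t) = pvV ('7' :: t)
        rw [pvAV, pvV_cons, if_pos h10, pvAV_short t (by omega), h10]
        simp [pvDigitVal]
        ring
      · -- 12 or more digits: the overwrite happens in the tail
        have ht : 11 ≤ t.length := by simp at h; omega
        have hidx : (c :: t).length - 11 = (t.length - 11) + 1 := by simp; omega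
        rw [hidx]
        show pvAV (c :: t) = pvV (c :: t.set (t.length - 11) '7')
        rw [pvAV, pvV_cons, if_neg h10, ih, if_pos ht, List.length_set]
        ring
    · rw [if_neg h]
      exact pvAV_short _ (by simp at h ⊢; omega)

-- ===== VERDICT (by name: the statement is the Claim_ definition above) =====
theorem clear_phone_number_spec : Claim_equal_clear_phone_number := by
  intro pn _
  show clear_phone_number pn = clear_phone_number_alt pn
  unfold clear_phone_number clear_phone_number_alt
  rw [List.foldl_reverse]
  have hguard : pn.toList.foldr
      (fun c (st : Int × Int) =>
        if c.isDigit then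
          (st.1 + (if st.2 = 10000000000 then st.2 * 7 else st.2 * pvDigitVal c), st.2 * 10)
        else st) (0, 1)
      = (pn.toList.filter Char.isDigit).foldr
        (fun c (st : Int × Int) =>
          (st.1 + (if st.2 = 10000000000 then st.2 * 7 else st.2 * pvDigitVal c), st.2 * 10)) (0, 1) := by
    rw [List.foldr_filter]
  rw [hguard, pv_foldr_A]
  set ds := pn.toList.filter Char.isDigit with hds
  simp only
  have hval : (if 11 ≤ ds.length then ds.set (ds.length - 11) '7' else ds).foldl
      (fun acc c => acc * 10 + pvDigitVal c) 0 = pvAV ds := (pvAV_eq ds).symm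
  rw [hval]
  by_cases h7 : ds.length = 7
  · rw [if_pos (by rw [h7]; norm_num), if_pos h7, h7]
  · rw [if_neg ?_, if_neg h7]
    intro hc
    exact h7 (pv_pow10_inj ds.length 7 (by rw [hc]; norm_num))
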